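-- pv_equiv track=rewrite | github.com/lugazdik/AoC_2023 | day15/day15.py | part2
-- ===== SOURCE A (Python) =====
-- from collections import defaultdict
--
-- def compute_hash(input_string: str) -> int:
--     current_value = 0
--     for letter in input_string:
--         current_value = (current_value + ord(letter)) * 17 % 256
--     return current_value
--
-- def part2(parsed_input: list[str]) -> int:
--     hash_map = defaultdict(list)
--     for item in parsed_input:
--         if "=" in item:
--             label, value = item.split("=")
--             computed_hash = compute_hash(label)
--             found = False
--             for saved_value in hash_map[computed_hash]:
--                 if saved_value["label"] == label:
--                     saved_value["value"] = int(value)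
--                     found = True
--                     break
--             if not found:
--                 hash_map[computed_hash].append({"label": label, "value": int(value)})
--         elif "-" in item:
--             label = item.split("-")[0]
--             computed_hash = compute_hash(label)
--             for saved_value in hash_map[computed_hash]:
--                 if saved_value["label"] == label:
--                     hash_map[computed_hash].remove(saved_value)
--                     break
--     results = []
--     for key, value in sorted(hash_map.items(), key=lambda x: x[0]):
--         index = 1
--         for item in value:
--             results.append((key + 1) * index * item["value"])
--             index += 1
--     return sum(results)
-- ===== SOURCE B (Python) =====
-- def compute_hash(input_string: str) -> int:
--     current_value = 0
--     for letter in input_string: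
--         current_value = (current_value + ord(letter)) * 17 % 256
--     return current_value
--
-- def part2(parsed_input: list[str]) -> int:
--     # one flat insertion-ordered dict keyed by label, then a single
--     # per-hash slot-counter pass that accumulates the focusing power directly
--     lenses = {}
--     for item in parsed_input:
--         if "=" in item:
--             label, value = item.split("=")
--             lenses[label] = int(value)
--         elif "-" in item:
--             lenses.pop(item.split("-")[0], None)
--     counts = {}
--     total = 0
--     for label, value in lenses.items():
--         h = compute_hash(label)
--         slot = counts.get(h, 0) + 1
--         counts[h] = slot
--         total += (h + 1) * slot * value
--     return total
-- ===== Notes on version B (the rewrite author's own statement) =====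
-- stated objective: alternative
-- what changed: Replaces the 256-bucket dict of label/value lists (inner linear bucket scans for update/remove, plus a final sort over buckets) by one flat insertion-ordered dict keyed by label and a single per-hash slot-counter pass that accumulates the focusing power directly, with no sort.
import Mathlib
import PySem

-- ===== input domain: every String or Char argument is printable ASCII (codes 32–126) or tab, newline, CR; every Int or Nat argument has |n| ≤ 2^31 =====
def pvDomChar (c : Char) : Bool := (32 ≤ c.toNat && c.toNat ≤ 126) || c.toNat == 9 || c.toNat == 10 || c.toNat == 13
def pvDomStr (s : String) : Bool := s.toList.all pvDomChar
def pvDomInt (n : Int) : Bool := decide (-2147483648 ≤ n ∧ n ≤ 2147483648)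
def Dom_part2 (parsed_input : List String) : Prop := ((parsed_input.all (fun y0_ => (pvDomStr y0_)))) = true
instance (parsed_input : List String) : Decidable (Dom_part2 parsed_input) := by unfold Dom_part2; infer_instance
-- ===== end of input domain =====

-- B replaces A's 256-bucket dict of label/value lists (with inner bucket scans and a
-- final sort over buckets) by one flat label-keyed dict plus a single per-hash
-- slot-counter pass; equivalence is about the return value (neither mutates its input).

-- ===== PORT A =====
-- helper of both Pythons (identical source in Source A and Source B)
def computeHash (s : String) : Int :=
  s.toList.foldl (fun current_value letter =>
    PySem.Int.mod ((current_value + (letter.toNat : Int)) * 17) 256) 0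

-- shared parsing of an '=' item: `label, value = item.split("="); int(value)`
-- (none = the ValueError cases, excluded by Pre_)
def part2ParseEq (parts : List String) : Option (String × Int) :=
  match parts with
  | [label, value] =>
    match PySem.Int.ofStr? value with
    | some v => some (label, v)
    | none => none
  | _ => none

-- the inner `for saved_value in hash_map[h]: … saved_value["value"] = int(value) … break`
def part2UpdateFirst (label : String) (v : Int) :
    List (String × Int) → List (String × Int) × Bool
  | [] => ([], false)
  | p :: rest =>
    if p.1 = label then ((p.1, v) :: rest, true)
    else
      let r := part2UpdateFirst label v rest
      (p :: r.1, r.2)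

-- the inner `for saved_value in hash_map[h]: … .remove(saved_value); break`
def part2RemoveFirst (label : String) :
    List (String × Int) → List (String × Int)
  | [] => []
  | p :: rest => if p.1 = label then rest else p :: part2RemoveFirst label rest

def part2StepA (hash_map : PySem.Dict Int (List (String × Int))) (item : String) :
    PySem.Dict Int (List (String × Int)) :=
  if PySem.Str.isIn "=" item then
    match part2ParseEq ((PySem.Str.split? item "=").getD []) with
    | some (label, v) =>
      let computed_hash := computeHash label
      let cur := hash_map.getD computed_hash []
      let uf := part2UpdateFirst label v cur
      hash_map.insert computed_hash (if uf.2 then uf.1 else cur ++ [(label, v)])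
    | none => hash_map
  else if PySem.Str.isIn "-" item then
    let label := ((PySem.Str.split? item "-").getD []).getD 0 ""
    let computed_hash := computeHash label
    hash_map.insert computed_hash (part2RemoveFirst label (hash_map.getD computed_hash []))
  else hash_map

def part2 (parsed_input : List String) : Int :=
  let hash_map := parsed_input.foldl part2StepA PySem.Dict.empty
  let results :=
    (PySem.List.sorted hash_map.items (fun x => x.1) false).foldl
      (fun (results : List Int) kv =>
        (kv.2.foldl
          (fun (acc : List Int × Int) it =>
            (acc.1 ++ [(kv.1 + 1) * acc.2 * it.2], acc.2 + 1))
          (results, 1)).1)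
      []
  results.sum

-- ===== PORT B =====
def part2StepB (lenses : PySem.Dict String Int) (item : String) :
    PySem.Dict String Int :=
  if PySem.Str.isIn "=" item then
    match part2ParseEq ((PySem.Str.split? item "=").getD []) with
    | some (label, v) => lenses.insert label v
    | none => lenses
  else if PySem.Str.isIn "-" item then
    lenses.erase (((PySem.Str.split? item "-").getD []).getD 0 "")
  else lenses

def part2ScoreStep (acc : PySem.Dict Int Int × Int) (p : String × Int) :
    PySem.Dict Int Int × Int :=
  let h := computeHash p.1
  let slot := acc.1.getD h 0 + 1
  (acc.1.insert h slot, acc.2 + (h + 1) * slot * p.2)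

def part2_alt (parsed_input : List String) : Int :=
  let lenses := parsed_input.foldl part2StepB PySem.Dict.empty
  (lenses.items.foldl part2ScoreStep (PySem.Dict.empty, 0)).2

-- ===== PRECONDITION & SPEC =====
-- Pre_ excludes exactly the items on which A raises ValueError: an '=' item whose
-- split("=") does not have exactly two parts (unpacking fails) or whose part after
-- '=' is not accepted by int() .
def part2PreItem (item : String) : Bool :=
  !(PySem.Str.isIn "=" item) ||
    ((((PySem.Str.split? item "=").getD []).length == 2) &&
      (PySem.Int.ofStr? (((PySem.Str.split? item "=").getD []).getD 1 "")).isSome)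

def Pre_part2 (parsed_input : List String) : Prop :=
  parsed_input.all part2PreItem = true
instance (parsed_input : List String) : Decidable (Pre_part2 parsed_input) := by
  unfold Pre_part2; infer_instance

def pvWitness_part2 : List String := ["ab=3", "cd-", "qp=-2", "ab=10", "zz", "cd=7"]

def Spec_part2 (parsed_input : List String) (out : Int) : Prop := out = part2_alt parsed_input
instance (parsed_input : List String) (out : Int) : Decidable (Spec_part2 parsed_input out) := by unfold Spec_part2; infer_instance

-- ===== CLAIM (what is proved, stated in full; the proofs are below) =====
def Claim_equal_part2 : Prop := ∀ (parsed_input : List String), Dom_part2 parsed_input → Pre_part2 parsed_input → Spec_part2 parsed_input (part2 parsed_input)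

-- ===== LEMMAS AND PROOFS =====

-- the coupling invariant: each bucket of A's hash_map is the hash-filtered
-- sublist of B's flat lens dict, and both dicts have distinct keys
def part2Rel (hm : PySem.Dict Int (List (String × Int))) (ls : PySem.Dict String Int) : Prop :=
  hm.keys.Nodup ∧ ls.keys.Nodup ∧
    ∀ h : Int, hm.getD h [] = ls.items.filter (fun p => computeHash p.1 == h)

theorem part2_items_erase {ls : PySem.Dict String Int} {l : String} :
    (ls.erase l).items = ls.items.filter (fun p => !(p.1 == l)) := rfl

theorem part2_keys_eq (ls : PySem.Dict String Int) : ls.keys = ls.items.map Prod.fst := rfl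

theorem part2_updateFirst_not_mem (label : String) (v : Int) :
    ∀ (F : List (String × Int)), label ∉ F.map Prod.fst →
      part2UpdateFirst label v F = (F, false) := by
  intro F
  induction F with
  | nil => intro _; rfl
  | cons p r ih =>
    intro h
    simp only [List.map_cons, List.mem_cons] at h
    push_neg at h
    simp [part2UpdateFirst, Ne.symm h.1, ih h.2]

theorem part2_map_noreplace2 (label : String) (v : Int) :
    ∀ (F : List (String × Int)), label ∉ F.map Prod.fst →
      F.map (fun p => if p.1 = label then (label, v) else p) = F := by
  intro F
  induction F with
  | nil => intro _; rfl
  | cons p r ih =>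
    intro h
    simp only [List.map_cons, List.mem_cons] at h
    push_neg at h
    simp only [List.map_cons, if_neg (Ne.symm h.1), ih h.2]

theorem part2_updateFirst_mem (label : String) (v : Int) :
    ∀ (F : List (String × Int)), (F.map Prod.fst).Nodup → label ∈ F.map Prod.fst →
      part2UpdateFirst label v F =
        (F.map (fun p => if p.1 == label then (label, v) else p), true) := by
  intro F
  induction F with
  | nil => intro _ h; simp at h
  | cons p r ih =>
    intro hnd hmem
    simp only [List.map_cons, List.nodup_cons] at hnd
    by_cases hp : p.1 = label
    · have h2 : label ∉ r.map Prod.fst := hp ▸ hnd.1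
      simp [part2UpdateFirst, hp, part2_map_noreplace2 label v r h2]
    · simp only [List.map_cons, List.mem_cons] at hmem
      rcases hmem with h1 | h2
      · exact absurd h1.symm hp
      · simp [part2UpdateFirst, hp, ih hnd.2 h2]

theorem part2_removeFirst_nodup (label : String) :
    ∀ (F : List (String × Int)), (F.map Prod.fst).Nodup →
      part2RemoveFirst label F = F.filter (fun p => !(p.1 == label)) := by
  intro F
  induction F with
  | nil => intro _; rfl
  | cons p r ih =>
    intro hnd
    simp only [List.map_cons, List.nodup_cons] at hnd
    by_cases hp : p.1 = label
    · have h2 : label ∉ r.map Prod.fst := hp ▸ hnd.1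
      have hr : r.filter (fun q => !(q.1 == label)) = r := by
        apply List.filter_eq_self.mpr
        intro q hq
        have : q.1 ≠ label := fun hql => h2 (List.mem_map.mpr ⟨q, hq, hql⟩)
        simp [this]
      simp [part2RemoveFirst, hp, hr]
    · simp [part2RemoveFirst, hp, ih hnd.2]

theorem part2_filter_map_ne (label : String) (v : Int) (h' : Int)
    (hne : computeHash label ≠ h') :
    ∀ (L : List (String × Int)),
      (L.map (fun p => if p.1 == label then (label, v) else p)).filter
          (fun p => computeHash p.1 == h') =
        L.filter (fun p => computeHash p.1 == h') := by
  intro L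
  induction L with
  | nil => rfl
  | cons p r ih =>
    by_cases hp : p.1 = label
    · have h1 : (p.1 == label) = true := by simp [hp]
      have h2 : (computeHash label == h') = false := by simp [hne]
      have h3 : (computeHash p.1 == h') = false := by simp [hp, hne]
      simp only [List.map_cons, List.filter_cons, h1, if_true, h2, h3,
        Bool.false_eq_true, if_false]
      exact ih
    · have h1 : (p.1 == label) = false := by simp [hp]
      simp only [List.map_cons, List.filter_cons, h1, Bool.false_eq_true, if_false]
      rw [ih]

theorem part2_filter_map_self (label : String) (v : Int) (L : List (String × Int)) :
    (L.map (fun p => if p.1 == label then (label, v) else p)).filter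
        (fun p => computeHash p.1 == computeHash label) =
      (L.filter (fun p => computeHash p.1 == computeHash label)).map
        (fun p => if p.1 == label then (label, v) else p) := by
  rw [List.filter_map]
  apply congrArg
  apply List.filter_congr
  intro p _
  by_cases hp : p.1 = label
  · simp [Function.comp, hp]
  · simp [Function.comp, hp]

theorem part2_filter_filter_ne (label : String) (h' : Int)
    (hne : computeHash label ≠ h') (L : List (String × Int)) :
    (L.filter (fun p => !(p.1 == label))).filter (fun p => computeHash p.1 == h') =
      L.filter (fun p => computeHash p.1 == h') := by
  rw [List.filter_filter]
  apply List.filter_congr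
  intro p _
  by_cases hp : p.1 = label
  · simp [hp, hne]
  · simp [hp]

theorem part2_filter_filter_comm (label : String) (h' : Int) (L : List (String × Int)) :
    (L.filter (fun p => !(p.1 == label))).filter (fun p => computeHash p.1 == h') =
      (L.filter (fun p => computeHash p.1 == h')).filter (fun p => !(p.1 == label)) := by
  rw [List.filter_filter, List.filter_filter]
  apply List.filter_congr
  intro p _
  rw [Bool.and_comm]

theorem part2_mem_keys_iff_filter (ls : PySem.Dict String Int) (label : String) :
    label ∈ ls.keys ↔
      label ∈ (ls.items.filter (fun p => computeHash p.1 == computeHash label)).map Prod.fst := by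
  rw [part2_keys_eq]
  constructor
  · intro h
    obtain ⟨p, hp, hpl⟩ := List.mem_map.mp h
    exact List.mem_map.mpr ⟨p, List.mem_filter.mpr ⟨hp, by simp [hpl]⟩, hpl⟩
  · intro h
    obtain ⟨p, hp, hpl⟩ := List.mem_map.mp h
    exact List.mem_map.mpr ⟨p, (List.mem_filter.mp hp).1, hpl⟩

theorem part2_filter_keys_nodup (ls : PySem.Dict String Int) (hnd : ls.keys.Nodup)
    (P : String × Int → Bool) :
    ((ls.items.filter P).map Prod.fst).Nodup := by
  rw [part2_keys_eq] at hnd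
  exact ((List.filter_sublist).map Prod.fst).nodup hnd

theorem part2_rel_step (hm : PySem.Dict Int (List (String × Int)))
    (ls : PySem.Dict String Int) (item : String)
    (hpre : part2PreItem item = true) (hrel : part2Rel hm ls) :
    part2Rel (part2StepA hm item) (part2StepB ls item) := by
  obtain ⟨hnA, hnB, hf⟩ := hrel
  by_cases heq : PySem.Str.isIn "=" item = true
  · simp only [part2PreItem, heq, Bool.not_true, Bool.false_or, Bool.and_eq_true,
      beq_iff_eq, Option.isSome_iff_exists] at hpre
    obtain ⟨hlen, v, hv⟩ := hpre
    obtain ⟨a, b, hab⟩ :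
        ∃ a b, (PySem.Str.split? item "=").getD [] = [a, b] := by
      rcases hL : (PySem.Str.split? item "=").getD [] with _ | ⟨a, _ | ⟨b, _ | ⟨c, t⟩⟩⟩ <;>
        rw [hL] at hlen <;> simp_all
    rw [hab] at hv
    simp only [List.getD, List.getElem?_cons_succ, List.getElem?_cons_zero,
      Option.getD_some] at hv
    simp only [part2StepA, part2StepB, heq, if_true, hab, part2ParseEq, hv]
    refine ⟨PySem.Dict.nodup_keys_insert _ _ _ hnA, PySem.Dict.nodup_keys_insert _ _ _ hnB, ?_⟩
    intro h'
    have hFnd := part2_filter_keys_nodup ls hnB (fun p => computeHash p.1 == computeHash a)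
    by_cases hcont : ls.contains a = true
    · have hmem : a ∈ ls.keys := (PySem.Dict.contains_iff_mem_keys ls a).mp hcont
      have hmemF := (part2_mem_keys_iff_filter ls a).mp hmem
      rw [hf (computeHash a)] at *
      rw [part2_updateFirst_mem a v _ hFnd hmemF]
      by_cases hh : h' = computeHash a
      · subst hh
        rw [PySem.Dict.getD_insert_self]
        rw [PySem.Dict.items_insert ls a v, if_pos hcont]
        exact (part2_filter_map_self a v ls.items).symm
      · rw [PySem.Dict.getD_insert, if_neg hh, hf h']
        rw [PySem.Dict.items_insert ls a v, if_pos hcont]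
        exact (part2_filter_map_ne a v h' (fun he => hh (he.symm)) ls.items).symm
    · have hcontf : ls.contains a = false := by
        cases hC : ls.contains a
        · rfl
        · exact absurd hC hcont
      have hnmem : a ∉ ls.keys := fun hmm =>
        hcont ((PySem.Dict.contains_iff_mem_keys ls a).mpr hmm)
      have hnF : a ∉ (ls.items.filter (fun p => computeHash p.1 == computeHash a)).map Prod.fst :=
        fun hmm => hnmem ((part2_mem_keys_iff_filter ls a).mpr hmm)
      rw [part2_updateFirst_not_mem a v _ (by rw [hf (computeHash a)]; exact hnF)]
      rw [PySem.Dict.items_insert ls a v, if_neg hcont]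
      by_cases hh : h' = computeHash a
      · subst hh
        rw [PySem.Dict.getD_insert_self, hf (computeHash a)]
        simp [List.filter_append]
      · rw [PySem.Dict.getD_insert, if_neg hh, hf h']
        have hb : (computeHash a == h') = false :=
          beq_eq_false_iff_ne.mpr (fun he => hh he.symm)
        simp [List.filter_append, hb]
  · by_cases hdash : PySem.Str.isIn "-" item = true
    · simp only [part2StepA, part2StepB, heq, hdash, if_true, if_false,
        Bool.false_eq_true]
      set l := ((PySem.Str.split? item "-").getD []).getD 0 "" with hl
      refine ⟨PySem.Dict.nodup_keys_insert _ _ _ hnA, ?_, ?_⟩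
      · show ((ls.erase l).items.map Prod.fst).Nodup
        rw [part2_items_erase]
        exact part2_filter_keys_nodup ls hnB _
      · intro h'
        have hFnd := part2_filter_keys_nodup ls hnB (fun p => computeHash p.1 == computeHash l)
        by_cases hh : h' = computeHash l
        · subst hh
          rw [PySem.Dict.getD_insert_self, hf (computeHash l),
            part2_removeFirst_nodup l _ hFnd, part2_items_erase,
            part2_filter_filter_comm]
        · rw [PySem.Dict.getD_insert, if_neg hh, hf h', part2_items_erase,
            part2_filter_filter_ne l h' (fun he => hh he.symm)]
    · simp only [part2StepA, part2StepB, heq, hdash, if_false, Bool.false_eq_true]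
      exact ⟨hnA, hnB, hf⟩

theorem part2_rel_empty : part2Rel PySem.Dict.empty PySem.Dict.empty := by
  refine ⟨by simp [PySem.Dict.empty], by simp [PySem.Dict.empty], ?_⟩
  intro h
  rfl

theorem part2_fold_rel :
    ∀ (pi : List String) (hm : PySem.Dict Int (List (String × Int)))
      (ls : PySem.Dict String Int),
      (∀ it ∈ pi, part2PreItem it = true) → part2Rel hm ls →
      part2Rel (pi.foldl part2StepA hm) (pi.foldl part2StepB ls) := by
  intro pi
  induction pi with
  | nil => intro hm ls _ h; exact h
  | cons it r ih =>
    intro hm ls hpre hrel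
    simp only [List.foldl_cons]
    exact ih _ _ (fun x hx => hpre x (List.mem_cons_of_mem _ hx))
      (part2_rel_step hm ls it (hpre it (List.mem_cons_self)) hrel)

-- the summed focusing power of one box whose first slot has index i
def part2BoxSumFrom (h i : Int) : List (String × Int) → Int
  | [] => 0
  | p :: r => (h + 1) * i * p.2 + part2BoxSumFrom h (i + 1) r

theorem part2_innerA (h : Int) :
    ∀ (vs : List (String × Int)) (res : List Int) (i : Int),
      ((vs.foldl
          (fun (acc : List Int × Int) it =>
            (acc.1 ++ [(h + 1) * acc.2 * it.2], acc.2 + 1))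
          (res, i)).1).sum = res.sum + part2BoxSumFrom h i vs := by
  intro vs
  induction vs with
  | nil => intro res i; simp [part2BoxSumFrom]
  | cons p r ih =>
    intro res i
    simp only [List.foldl_cons]
    rw [ih]
    simp [part2BoxSumFrom]
    ring

theorem part2_outerA :
    ∀ (l : List (Int × List (String × Int))) (res : List Int),
      (l.foldl
          (fun (results : List Int) kv =>
            (kv.2.foldl
              (fun (acc : List Int × Int) it =>
                (acc.1 ++ [(kv.1 + 1) * acc.2 * it.2], acc.2 + 1))
              (results, 1)).1)
          res).sum =
        res.sum + (l.map (fun kv => part2BoxSumFrom kv.1 1 kv.2)).sum := by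
  intro l
  induction l with
  | nil => intro res; simp
  | cons kv r ih =>
    intro res
    simp only [List.foldl_cons]
    rw [ih, part2_innerA]
    simp only [List.map_cons, List.sum_cons]
    ring

theorem part2_sum_map_eq_add (h : Int) (f g : Int → Int) (δ : Int) :
    ∀ (K : List Int), K.Nodup → h ∈ K → (∀ k ∈ K, k ≠ h → f k = g k) → f h = δ + g h →
      (K.map f).sum = δ + (K.map g).sum := by
  intro K
  induction K with
  | nil => intro _ hm; simp at hm
  | cons k r ih =>
    intro hnd hm hne hat
    simp only [List.nodup_cons] at hnd
    simp only [List.map_cons, List.sum_cons]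
    rcases List.mem_cons.mp hm with rfl | hmr
    · have hr : r.map f = r.map g := by
        apply List.map_congr_left
        intro x hx
        exact hne x (List.mem_cons_of_mem _ hx) (fun hxh => hnd.1 (hxh ▸ hx))
      rw [hat, hr]; ring
    · have hk : k ≠ h := fun hkh => hnd.1 (hkh ▸ hmr)
      rw [hne k (List.mem_cons_self) hk, ih hnd.2 hmr
        (fun x hx => hne x (List.mem_cons_of_mem _ hx)) hat]
      ring

theorem part2_totalB (K : List Int) (hK : K.Nodup) :
    ∀ (xs : List (String × Int)) (c : PySem.Dict Int Int) (t : Int),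
      (∀ p ∈ xs, computeHash p.1 ∈ K) →
      (xs.foldl part2ScoreStep (c, t)).2 =
        t + (K.map (fun k =>
          part2BoxSumFrom k (c.getD k 0 + 1)
            (xs.filter (fun p => computeHash p.1 == k)))).sum := by
  intro xs
  induction xs with
  | nil =>
    intro c t _
    simp only [List.foldl_nil, List.filter_nil]
    rw [List.sum_eq_zero]
    · ring
    · intro x hx
      obtain ⟨k, _, rfl⟩ := List.mem_map.mp hx
      rfl
  | cons p r ih =>
    intro c t hcov
    simp only [List.foldl_cons, part2ScoreStep]
    rw [ih _ _ (fun q hq => hcov q (List.mem_cons_of_mem _ hq))]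
    rw [part2_sum_map_eq_add (computeHash p.1)
      (fun k => part2BoxSumFrom k (c.getD k 0 + 1)
        ((p :: r).filter (fun p => computeHash p.1 == k)))
      (fun k => part2BoxSumFrom k
        ((c.insert (computeHash p.1) (c.getD (computeHash p.1) 0 + 1)).getD k 0 + 1)
        (r.filter (fun p => computeHash p.1 == k)))
      ((computeHash p.1 + 1) * (c.getD (computeHash p.1) 0 + 1) * p.2)
      K hK (hcov p (List.mem_cons_self)) ?_ ?_]
    · ring
    · intro k _ hk
      have h1 : (computeHash p.1 == k) = false := by
        rw [beq_eq_false_iff_ne]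
        intro he
        exact hk he.symm
      beta_reduce
      simp only [List.filter_cons, h1, Bool.false_eq_true, if_false,
        PySem.Dict.getD_insert]
      rw [if_neg hk]
    · beta_reduce
      simp only [PySem.Dict.getD_insert_self, List.filter_cons, beq_self_eq_true,
        if_true, part2BoxSumFrom]

theorem part2_final_eq (hm : PySem.Dict Int (List (String × Int)))
    (ls : PySem.Dict String Int) (hrel : part2Rel hm ls) :
    ((PySem.List.sorted hm.items (fun x => x.1) false).foldl
        (fun (results : List Int) kv =>
          (kv.2.foldl
            (fun (acc : List Int × Int) it =>
              (acc.1 ++ [(kv.1 + 1) * acc.2 * it.2], acc.2 + 1))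
            (results, 1)).1)
        []).sum =
      (ls.items.foldl part2ScoreStep (PySem.Dict.empty, 0)).2 := by
  obtain ⟨hnA, hnB, hf⟩ := hrel
  have hcov : ∀ p ∈ ls.items, computeHash p.1 ∈ hm.keys := by
    intro p hp
    by_contra hmem
    have hcontf : hm.contains (computeHash p.1) = false := by
      cases hC : hm.contains (computeHash p.1)
      · rfl
      · exact absurd ((PySem.Dict.contains_iff_mem_keys hm (computeHash p.1)).mp hC) hmem
    have h0 : hm.getD (computeHash p.1) [] = [] :=
      PySem.Dict.getD_of_not_contains hm [] hcontf
    rw [hf] at h0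
    have hpf : p ∈ ls.items.filter (fun q => computeHash q.1 == computeHash p.1) :=
      List.mem_filter.mpr ⟨hp, by simp⟩
    rw [h0] at hpf
    exact absurd hpf (List.not_mem_nil)
  rw [part2_outerA]
  rw [List.Perm.sum_eq ((PySem.List.sorted_perm hm.items (fun x => x.1) false).map
    (fun kv => part2BoxSumFrom kv.1 1 kv.2))]
  rw [PySem.Dict.items_eq_map_keys hm hnA [], List.map_map]
  rw [part2_totalB hm.keys hnA ls.items PySem.Dict.empty 0 hcov]
  have hmc : hm.keys.map ((fun kv => part2BoxSumFrom kv.1 1 kv.2) ∘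
      (fun k => (k, hm.getD k []))) =
      hm.keys.map (fun k =>
        part2BoxSumFrom k (PySem.Dict.empty.getD k 0 + 1)
          (ls.items.filter (fun p => computeHash p.1 == k))) := by
    apply List.map_congr_left
    intro k _
    simp only [Function.comp, PySem.Dict.getD_empty, zero_add]
    rw [hf k]
  rw [hmc]
  simp

-- ===== VERDICT (by name: the statement is the Claim_ definition above) =====
theorem part2_spec : Claim_equal_part2 := by
  intro parsed_input _ hpre
  unfold Spec_part2
  have hall : ∀ it ∈ parsed_input, part2PreItem it = true :=
    fun it hit => List.all_eq_true.mp hpre it hit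
  have hrel := part2_fold_rel parsed_input PySem.Dict.empty PySem.Dict.empty hall
    part2_rel_empty
  simp only [part2, part2_alt]
  exact part2_final_eq _ _ hrel
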